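-- pv_equiv track=rewrite | github.com/phetdam/daily-coding-problem | legacy/bit_reverse.py | bit_reverse
-- ===== SOURCE A (Python) =====
-- def bit_reverse(n):
--     """
--     return int n with reversed bits. we first figure out how many bits are in n
--     to create our mask of 1s, xor with the 1s, and return the result.
--     """
--     # ignore signed or unsigned integers
--     # power of highest bit
--     bp = 0
--     # continue to shift bits to the right and increment bp until the result is 1
--     temp = n
--     while temp > 1:
--         temp = temp >> 1
--         bp = bp + 1
--     # create mask of ones where the highest bit is the bp + 1th bit
--     mask = 0
--     while bp > -1:
--         mask = mask + pow(2, bp)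
--         bp = bp - 1
--     # return masked result
--     return n ^ mask
-- ===== SOURCE B (Python) =====
-- def bit_reverse(n):
--     """
--     return int n with reversed bits: closed-form mask from bit_length, no loops.
--     For n <= 1 (0, 1 and negatives) the original's counting loop never runs, so
--     the mask is 1; otherwise the mask covers all bit_length(n) bits.
--     """
--     mask = 1 if n <= 1 else (1 << n.bit_length()) - 1
--     return n ^ mask
-- ===== Notes on version B (the rewrite author's own statement) =====
-- stated objective: simpler
-- what changed: Both while loops (shift-count of the highest bit, then summing pow(2,bp) to build the mask) are replaced by a single closed-form mask computed from n.bit_length(); the n<=1 case keeps the original's mask of 1.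
import Mathlib
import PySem

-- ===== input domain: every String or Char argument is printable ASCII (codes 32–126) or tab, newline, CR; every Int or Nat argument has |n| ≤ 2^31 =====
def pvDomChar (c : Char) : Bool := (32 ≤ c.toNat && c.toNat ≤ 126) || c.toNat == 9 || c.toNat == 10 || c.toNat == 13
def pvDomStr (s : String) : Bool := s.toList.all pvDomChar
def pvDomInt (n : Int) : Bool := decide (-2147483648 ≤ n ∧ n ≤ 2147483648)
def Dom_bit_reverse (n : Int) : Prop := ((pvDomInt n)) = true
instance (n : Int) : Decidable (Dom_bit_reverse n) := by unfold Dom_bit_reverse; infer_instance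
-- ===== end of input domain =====

-- B replaces A's two while loops by one closed-form mask built from bit_length
-- (objective: simpler); equal return value on every Int.

-- ===== PORT A =====
-- first while loop: while temp > 1: temp = temp >> 1; bp = bp + 1
def bitrevLoop1 (temp bp : Int) : Int :=
  if temp > 1 then bitrevLoop1 (temp >>> (1 : Nat)) (bp + 1) else bp
termination_by temp.toNat
decreasing_by
  rename_i h
  have : temp >>> (1 : Nat) = ((temp.toNat / 2 : Nat) : Int) := by
    have h1 : temp = ((temp.toNat : Nat) : Int) := by omega
    rw [h1]
    rw [← Int.natCast_shiftRight]
    norm_cast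
  rw [this]; omega

-- second while loop: while bp > -1: mask = mask + pow(2, bp); bp = bp - 1
-- pow(2, bp) ported as 2 ^ bp.toNat — exact here since the loop only runs with bp > -1
def bitrevLoop2 (bp mask : Int) : Int :=
  if bp > -1 then bitrevLoop2 (bp - 1) (mask + 2 ^ bp.toNat) else mask
termination_by (bp + 1).toNat
decreasing_by rename_i h; omega

def bit_reverse (n : Int) : Int :=
  PySem.Int.bxor n (bitrevLoop2 (bitrevLoop1 n 0) 0)

-- ===== PORT B =====
def bit_reverse_alt (n : Int) : Int :=
  PySem.Int.bxor n
    (if n ≤ 1 then 1 else ((1 : Int) <<< PySem.Int.bitLength n) - 1)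

-- ===== PRECONDITION & SPEC =====
def Spec_bit_reverse (n : Int) (out : Int) : Prop := out = bit_reverse_alt n
instance (n : Int) (out : Int) : Decidable (Spec_bit_reverse n out) := by unfold Spec_bit_reverse; infer_instance

-- ===== CLAIM (what is proved, stated in full; the proofs are below) =====
def Claim_equal_bit_reverse : Prop := ∀ (n : Int), Dom_bit_reverse n → Spec_bit_reverse n (bit_reverse n)

-- ===== LEMMAS AND PROOFS =====

-- the mask loop: starting from bp = k ≥ 0 it adds 2^k + … + 2^0 = 2^(k+1) - 1
theorem bitrevLoop2_eq (k : Nat) : ∀ mask : Int,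
    bitrevLoop2 (k : Int) mask = mask + 2 ^ (k + 1) - 1 := by
  induction k with
  | zero =>
    intro mask
    rw [bitrevLoop2, if_pos (by norm_num), bitrevLoop2, if_neg (by norm_num)]
    norm_num
    omega
  | succ k ih =>
    intro mask
    rw [bitrevLoop2, if_pos (by omega)]
    have h1 : ((k + 1 : Nat) : Int) - 1 = (k : Int) := by push_cast; ring
    have h2 : ((k + 1 : Nat) : Int).toNat = k + 1 := by omega
    rw [h1, h2, ih]
    ring

-- the count loop: for positive n it returns bp + bit_length(n) - 1
theorem bitrevLoop1_eq (m : Nat) (hm : 1 ≤ m) : ∀ bp : Int,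
    bitrevLoop1 (m : Int) bp = bp + (PySem.Int.bitLength (m : Int) : Int) - 1 := by
  induction m using Nat.strong_induction_on with
  | _ m ih =>
    intro bp
    rcases Nat.lt_or_ge m 2 with h2 | h2
    · have hm1 : m = 1 := by omega
      subst hm1
      rw [bitrevLoop1, if_neg (by norm_num)]
      have h1 : PySem.Int.bitLength ((1 : Nat) : Int) = 1 := by decide
      rw [h1]
      norm_num
    · rw [bitrevLoop1, if_pos (by exact_mod_cast h2)]
      have hshift : ((m : Int) >>> (1 : Nat)) = ((m / 2 : Nat) : Int) := by
        rw [← Int.natCast_shiftRight]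
        norm_cast
      rw [hshift, ih (m / 2) (by omega) (by omega)]
      rw [PySem.Int.bitLength_natCast (by omega : 0 < m)]
      push_cast
      ring

-- ===== VERDICT (by name: the statement is the Claim_ definition above) =====
theorem bit_reverse_spec : Claim_equal_bit_reverse := by
  intro n _
  unfold Spec_bit_reverse bit_reverse bit_reverse_alt
  rcases le_or_gt n 1 with h | h
  · -- n ≤ 1: the first loop never runs (bp stays 0), the second builds mask = 1
    rw [if_pos h, bitrevLoop1, if_neg (by omega)]
    have h0 : bitrevLoop2 0 0 = 1 := by
      have h := bitrevLoop2_eq 0 0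
      push_cast at h
      omega
    rw [h0]
  · -- n ≥ 2: loop1 counts bit_length n - 1, loop2 builds 2^bit_length n - 1
    rw [if_neg (by omega)]
    have hn : n = ((n.toNat : Nat) : Int) := by omega
    set L := PySem.Int.bitLength n with hL
    have hL1 : 1 ≤ L := by
      have := PySem.Int.lt_two_pow_bitLength n
      rw [← hL] at this
      by_contra hc
      have : L = 0 := by omega
      simp [this] at *
      omega
    have h1 : bitrevLoop1 n 0 = ((L - 1 : Nat) : Int) := by
      rw [hn, bitrevLoop1_eq n.toNat (by omega) 0]
      rw [← hn, ← hL]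
      push_cast [hL1]
      ring
    rw [h1, bitrevLoop2_eq (L - 1) 0]
    have hk : L - 1 + 1 = L := by omega
    rw [hk]
    rw [Int.shiftLeft_eq]
    ring_nf
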